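-- pv_equiv track=rewrite | github.com/MrBrantCode/unitest_baseline | mut_generate/mist_train_taco/taco_11202/solution.py | calculate_sentence_difficulty
-- ===== SOURCE A (Python) =====
-- def calculate_sentence_difficulty(S: str) -> int:
--     (h, e) = (0, 0)
--     vowels = 'AEIOUaeiou'
--     words = S.split()
--
--     for word in words:
--         consonants = ''
--         vowel_chars = ''
--         consecutive_consonants = 0
--
--         for char in word:
--             if char not in vowels:
--                 consonants += char
--                 consecutive_consonants += 1
--                 if consecutive_consonants >= 4:
--                     break
--             else:
--                 vowel_chars += char
--                 consecutive_consonants = 0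
--
--         if consecutive_consonants >= 4:
--             h += 1
--         elif len(consonants) > len(vowel_chars):
--             h += 1
--         else:
--             e += 1
--
--     return 5 * h + 3 * e
-- ===== SOURCE B (Python) =====
-- VOWELS = 'AEIOUaeiou'
--
-- def calculate_sentence_difficulty(S: str) -> int:
--     words = S.split()
--     h = sum(1 for w in words
--             if any(all(c not in VOWELS for c in w[i:i + 4])
--                    for i in range(len(w) - 3))
--             or 2 * sum(c not in VOWELS for c in w) > len(w))
--     return 5 * h + 3 * (len(words) - h)
-- ===== Notes on version B (the rewrite author's own statement) =====
-- stated objective: simpler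
-- what changed: A's per-word loop that interleaves building consonant/vowel strings with a consecutive-consonant counter and an early break is replaced by two independent whole-word aggregates: a sliding-window any/all test for 4 consecutive consonants plus a single consonant count (2*nc > len), combined in one counting comprehension; valid because a 4-consonant run always makes A classify the word hard regardless of where it breaks.
import Mathlib
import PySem

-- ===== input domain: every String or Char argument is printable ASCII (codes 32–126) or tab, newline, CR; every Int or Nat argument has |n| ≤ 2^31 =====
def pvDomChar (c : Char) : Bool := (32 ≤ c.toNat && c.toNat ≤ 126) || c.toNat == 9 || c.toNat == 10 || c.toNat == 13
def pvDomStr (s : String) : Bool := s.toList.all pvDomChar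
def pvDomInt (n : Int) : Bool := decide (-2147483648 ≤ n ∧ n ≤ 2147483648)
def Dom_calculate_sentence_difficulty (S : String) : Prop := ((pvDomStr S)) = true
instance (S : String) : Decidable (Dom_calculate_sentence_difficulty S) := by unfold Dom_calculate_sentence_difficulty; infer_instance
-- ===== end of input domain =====

-- B replaces A's interleaved string-building loop with early break by an aggregate consonant
-- count plus a separate sliding-window test for 4 consecutive consonants (objective: simpler).

-- ===== PORT A =====

-- 'char not in vowels' membership against the constant vowel string
def pvIsVowel (c : Char) : Bool := "AEIOUaeiou".toList.contains c

-- A's inner 'for char in word' loop: builds the consonant/vowel strings (as char lists),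
-- tracks the consecutive-consonant counter, breaks once it reaches 4
def pvLoopA : List Char → List Char → List Char → Nat → List Char × List Char × Nat
  | [], cs, vs, k => (cs, vs, k)
  | c :: rest, cs, vs, k =>
    if !pvIsVowel c then
      let cs' := cs ++ [c]
      let k' := k + 1
      if 4 ≤ k' then (cs', vs, k') else pvLoopA rest cs' vs k'
    else
      pvLoopA rest cs (vs ++ [c]) 0

-- A's outer loop over S.split(), accumulating (h, e)
def pvStepA (he : Int × Int) (word : String) : Int × Int :=
  let t := pvLoopA word.toList [] [] 0
  if 4 ≤ t.2.2 then (he.1 + 1, he.2)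
  else if t.2.1.length < t.1.length then (he.1 + 1, he.2)
  else (he.1, he.2 + 1)

def calculate_sentence_difficulty (S : String) : Int :=
  let res := (PySem.Str.split₀ S).foldl pvStepA (0, 0)
  5 * res.1 + 3 * res.2

-- ===== PORT B =====

-- Source B's per-word condition: a 4-wide all-consonant window exists (any/all over
-- range(len(w)-3), w[i:i+4] = take 4 of drop i — i is in range, so no clamping),
-- or consonants outnumber vowels (2*nc > len)
def pvHardB (w : String) : Bool :=
  (List.range (w.toList.length - 3)).any
      (fun i => ((w.toList.drop i).take 4).all (fun c => !pvIsVowel c))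
  || decide (w.toList.length < 2 * w.toList.countP (fun c => !pvIsVowel c))

def calculate_sentence_difficulty_alt (S : String) : Int :=
  let words := PySem.Str.split₀ S
  let h : Int := (words.countP pvHardB : Nat)
  5 * h + 3 * ((words.length : Int) - h)

-- ===== PRECONDITION & SPEC =====
def Spec_calculate_sentence_difficulty (S : String) (out : Int) : Prop := out = calculate_sentence_difficulty_alt S
instance (S : String) (out : Int) : Decidable (Spec_calculate_sentence_difficulty S out) := by unfold Spec_calculate_sentence_difficulty; infer_instance

-- ===== CLAIM (what is proved, stated in full; the proofs are below) =====
def Claim_equal_calculate_sentence_difficulty : Prop := ∀ (S : String), Dom_calculate_sentence_difficulty S → Spec_calculate_sentence_difficulty S (calculate_sentence_difficulty S)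

-- ===== LEMMAS AND PROOFS =====

-- recursive consecutive-consonant scanner with seed k (proof device linking A's break to B's windows)
def pvRunScan : List Char → Nat → Bool
  | [], _ => false
  | c :: rest, k =>
    if !pvIsVowel c then (if 4 ≤ k + 1 then true else pvRunScan rest (k + 1))
    else pvRunScan rest 0

-- a list shorter than 4 - k cannot complete a run
theorem pvRunScan_short : ∀ (l : List Char) (k : Nat), l.length + k < 4 → pvRunScan l k = false := by
  intro l
  induction l with
  | nil => intro k _; rfl
  | cons c rest ih =>
    intro k h
    simp only [List.length_cons] at h
    by_cases hv : pvIsVowel c = true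
    · have h1 : pvRunScan (c :: rest) k = pvRunScan rest 0 := by simp [pvRunScan, hv]
      rw [h1]; exact ih 0 (by omega)
    · replace hv : pvIsVowel c = false := by simpa using hv
      have h1 : pvRunScan (c :: rest) k = pvRunScan rest (k + 1) := by
        simp [pvRunScan, hv, show ¬ 4 ≤ k + 1 by omega]
      rw [h1]; exact ih (k + 1) (by omega)

-- prefix monotonicity of the window test
theorem pvPrefix_mono (l : List Char) (p : Char → Bool) {j j' : Nat} (hjj : j ≤ j')
    (h : (decide (j' ≤ l.length) && (l.take j').all p) = true) :
    (decide (j ≤ l.length) && (l.take j).all p) = true := by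
  simp only [Bool.and_eq_true, decide_eq_true_eq] at h ⊢
  refine ⟨le_trans hjj h.1, ?_⟩
  have h2 : List.take j l = List.take j (List.take j' l) := by
    rw [List.take_take, Nat.min_eq_left hjj]
  simp only [List.all_eq_true] at h ⊢
  intro x hx
  exact h.2 x (List.take_subset _ _ (h2 ▸ hx))

-- a seeded scan = "the first 4-k chars are consonants" or an unseeded scan
theorem pvRunScan_seed : ∀ (l : List Char) (k : Nat), k ≤ 3 →
    pvRunScan l k
      = ((decide (4 - k ≤ l.length) && (l.take (4 - k)).all (fun c => !pvIsVowel c))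
          || pvRunScan l 0) := by
  intro l
  induction l with
  | nil =>
    intro k hk
    simp [pvRunScan, show ¬ (4 - k ≤ 0) by omega]
  | cons c rest ih =>
    intro k hk
    by_cases hv : pvIsVowel c = true
    · have h1 : pvRunScan (c :: rest) k = pvRunScan rest 0 := by simp [pvRunScan, hv]
      have h0 : pvRunScan (c :: rest) 0 = pvRunScan rest 0 := by simp [pvRunScan, hv]
      rw [h1, h0]
      have htake : (4 - k) = (4 - k - 1) + 1 := by omega
      rw [htake, List.take_succ_cons]
      simp [hv]
    · replace hv : pvIsVowel c = false := by simpa using hv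
      by_cases h3 : k = 3
      · subst h3
        have h1 : pvRunScan (c :: rest) 3 = true := by simp [pvRunScan, hv]
        rw [h1, show (4 - 3 : Nat) = 0 + 1 from rfl, List.take_succ_cons]
        simp [hv]
      · have hklt : k + 1 ≤ 3 := by omega
        have h1 : pvRunScan (c :: rest) k = pvRunScan rest (k + 1) := by
          simp [pvRunScan, hv, show ¬ 4 ≤ k + 1 by omega]
        have h0 : pvRunScan (c :: rest) 0 = pvRunScan rest 1 := by
          simp [pvRunScan, hv]
        have hs : (4 - k) = (4 - (k + 1)) + 1 := by omega
        have hsplit : (decide (4 - k ≤ (c :: rest).length)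
              && ((c :: rest).take (4 - k)).all (fun c => !pvIsVowel c))
            = (decide (4 - (k + 1) ≤ rest.length)
              && (rest.take (4 - (k + 1))).all (fun c => !pvIsVowel c)) := by
          rw [hs, List.take_succ_cons]
          simp [hv]
        rw [h1, h0, ih (k + 1) hklt, ih 1 (by omega), hsplit,
          show (4 - 1 : Nat) = 3 from rfl]
        by_cases hP3 : (decide (3 ≤ rest.length)
            && (rest.take 3).all (fun c => !pvIsVowel c)) = true
        · have hPk := pvPrefix_mono rest (fun c => !pvIsVowel c)
            (show 4 - (k + 1) ≤ 3 by omega) hP3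
          rw [hP3, hPk]
          simp
        · rw [Bool.not_eq_true] at hP3
          rw [hP3]
          simp

-- the unseeded scan equals Source B's sliding-window any/all
theorem pvRunScan_eq_window : ∀ (l : List Char),
    pvRunScan l 0
      = (List.range (l.length - 3)).any
          (fun i => ((l.drop i).take 4).all (fun c => !pvIsVowel c)) := by
  intro l
  induction l with
  | nil => rfl
  | cons c rest ih =>
    by_cases hlen : rest.length < 3
    · have h1 : (c :: rest).length - 3 = 0 := by simp; omega
      rw [h1]
      simp only [List.range_zero, List.any_nil]
      exact pvRunScan_short _ 0 (by simp; omega)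
    · rw [Nat.not_lt] at hlen
      have h1 : (c :: rest).length - 3 = (rest.length - 3) + 1 := by simp; omega
      rw [h1, List.range_succ_eq_map]
      simp only [List.any_cons, List.any_map, List.drop_zero, Function.comp_def]
      have hshift : (List.range (rest.length - 3)).any
          (fun i => (((c :: rest).drop (i + 1)).take 4).all (fun c => !pvIsVowel c))
          = (List.range (rest.length - 3)).any
          (fun i => ((rest.drop i).take 4).all (fun c => !pvIsVowel c)) := by
        apply PySem.List.any_congr_mem
        intro i _
        rfl
      rw [hshift, ← ih]
      by_cases hv : pvIsVowel c = true
      · have h2 : pvRunScan (c :: rest) 0 = pvRunScan rest 0 := by simp [pvRunScan, hv]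
        rw [h2, show (4 : Nat) = 3 + 1 from rfl, List.take_succ_cons]
        simp [hv]
      · replace hv : pvIsVowel c = false := by simpa using hv
        have h2 : pvRunScan (c :: rest) 0 = pvRunScan rest 1 := by simp [pvRunScan, hv]
        rw [h2, pvRunScan_seed rest 1 (by omega),
          show (4 : Nat) = 3 + 1 from rfl, List.take_succ_cons]
        simp only [List.all_cons, hv, Bool.not_false, Bool.true_and]
        simp [show (3 + 1 - 1 : Nat) = 3 from rfl, hlen]

-- A's inner loop classifies exactly like (seeded run-scan OR consonant-majority)
theorem pvLoopA_class : ∀ (l cs vs : List Char) (k : Nat), k ≤ 3 →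
    ((decide (4 ≤ (pvLoopA l cs vs k).2.2))
        || decide ((pvLoopA l cs vs k).2.1.length < (pvLoopA l cs vs k).1.length))
      = (pvRunScan l k
          || decide (vs.length + l.countP pvIsVowel
              < cs.length + l.countP (fun c => !pvIsVowel c))) := by
  intro l
  induction l with
  | nil =>
    intro cs vs k hk
    simp [pvLoopA, pvRunScan, show ¬ (4 ≤ k) by omega]
  | cons c rest ih =>
    intro cs vs k hk
    by_cases hv : pvIsVowel c = true
    · have h1 : pvLoopA (c :: rest) cs vs k = pvLoopA rest cs (vs ++ [c]) 0 := by
        simp [pvLoopA, hv]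
      have h2 : pvRunScan (c :: rest) k = pvRunScan rest 0 := by simp [pvRunScan, hv]
      rw [h1, h2, ih cs (vs ++ [c]) 0 (by omega)]
      have e1 : List.countP pvIsVowel (c :: rest) = List.countP pvIsVowel rest + 1 := by
        simp [hv]
      have e2 : List.countP (fun x => !pvIsVowel x) (c :: rest)
          = List.countP (fun x => !pvIsVowel x) rest := by
        simp [hv]
      rw [e1, e2]
      simp only [List.length_append, List.length_singleton]
      congr 1
      rw [decide_eq_decide]
      omega
    · replace hv : pvIsVowel c = false := by simpa using hv
      by_cases h4 : 4 ≤ k + 1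
      · have h1 : pvLoopA (c :: rest) cs vs k = (cs ++ [c], vs, k + 1) := by
          simp [pvLoopA, hv, h4]
        have h2 : pvRunScan (c :: rest) k = true := by simp [pvRunScan, hv, h4]
        rw [h1, h2]
        simp [h4]
      · have h1 : pvLoopA (c :: rest) cs vs k = pvLoopA rest (cs ++ [c]) vs (k + 1) := by
          simp [pvLoopA, hv, h4]
        have h2 : pvRunScan (c :: rest) k = pvRunScan rest (k + 1) := by
          simp [pvRunScan, hv, h4]
        rw [h1, h2, ih (cs ++ [c]) vs (k + 1) (by omega)]
        have e1 : List.countP pvIsVowel (c :: rest) = List.countP pvIsVowel rest := by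
          simp [hv]
        have e2 : List.countP (fun x => !pvIsVowel x) (c :: rest)
            = List.countP (fun x => !pvIsVowel x) rest + 1 := by
          simp [hv]
        rw [e1, e2]
        simp only [List.length_append, List.length_singleton]
        congr 1
        rw [decide_eq_decide]
        omega

-- A's per-word step increments h exactly on B's hard words
theorem pvStepA_eq (he : Int × Int) (w : String) :
    pvStepA he w = (if pvHardB w then (he.1 + 1, he.2) else (he.1, he.2 + 1)) := by
  have hclass := pvLoopA_class w.toList [] [] 0 (by omega)
  rw [pvRunScan_eq_window] at hclass
  have hcount : ∀ l : List Char, l.countP pvIsVowel + l.countP (fun c => !pvIsVowel c)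
      = l.length := by
    intro l
    induction l with
    | nil => rfl
    | cons c t ih =>
      by_cases hv : pvIsVowel c = true <;> simp [hv] <;> omega
  unfold pvStepA pvHardB
  simp only [List.length_nil, Nat.zero_add] at hclass
  by_cases h4 : 4 ≤ (pvLoopA w.toList [] [] 0).2.2
  · rw [if_pos h4]
    simp only [h4, decide_true, Bool.true_or] at hclass
    have hB : ((List.range (w.toList.length - 3)).any
          (fun i => ((w.toList.drop i).take 4).all (fun c => !pvIsVowel c))
        || decide (w.toList.length < 2 * w.toList.countP (fun c => !pvIsVowel c))) = true := by
      rcases Bool.or_eq_true_iff.mp hclass.symm with h | h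
      · rw [h, Bool.true_or]
      · simp only [decide_eq_true_eq] at h
        simp only [Bool.or_eq_true, decide_eq_true_eq]
        right; have := hcount w.toList; omega
    rw [hB]
    simp
  · rw [if_neg h4]
    simp only [h4, decide_false, Bool.false_or] at hclass
    by_cases hlt : (pvLoopA w.toList [] [] 0).2.1.length < (pvLoopA w.toList [] [] 0).1.length
    · rw [if_pos hlt]
      simp only [hlt, decide_true] at hclass
      have hB : ((List.range (w.toList.length - 3)).any
            (fun i => ((w.toList.drop i).take 4).all (fun c => !pvIsVowel c))
          || decide (w.toList.length < 2 * w.toList.countP (fun c => !pvIsVowel c))) = true := by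
        rcases Bool.or_eq_true_iff.mp hclass.symm with h | h
        · rw [h, Bool.true_or]
        · simp only [decide_eq_true_eq] at h
          simp only [Bool.or_eq_true, decide_eq_true_eq]
          right; have := hcount w.toList; omega
      rw [hB]
      simp
    · rw [if_neg hlt]
      simp only [hlt, decide_false] at hclass
      have hB : ((List.range (w.toList.length - 3)).any
            (fun i => ((w.toList.drop i).take 4).all (fun c => !pvIsVowel c))
          || decide (w.toList.length < 2 * w.toList.countP (fun c => !pvIsVowel c))) = false := by
        rcases Bool.or_eq_false_iff.mp hclass.symm with ⟨hh1, hh2⟩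
        simp only [decide_eq_false_iff_not] at hh2
        simp only [Bool.or_eq_false_iff, decide_eq_false_iff_not]
        exact ⟨hh1, by have := hcount w.toList; omega⟩
      rw [hB]
      simp

-- A's fold over the words counts B's hard words
theorem pvFoldA : ∀ (ws : List String) (h e : Int),
    ws.foldl pvStepA (h, e)
      = (h + ((ws.countP pvHardB : Nat) : Int),
         e + ((ws.length : Int) - ((ws.countP pvHardB : Nat) : Int))) := by
  intro ws
  induction ws with
  | nil => intro h e; simp
  | cons w rest ih =>
    intro h e
    by_cases hw : pvHardB w = true
    · have e1 : List.countP pvHardB (w :: rest) = List.countP pvHardB rest + 1 := by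
        simp [hw]
      rw [List.foldl_cons, pvStepA_eq, if_pos hw, ih, e1]
      refine Prod.ext_iff.mpr ⟨?_, ?_⟩ <;> simp only [List.length_cons] <;>
        push_cast <;> ring_nf
    · rw [Bool.not_eq_true] at hw
      have e1 : List.countP pvHardB (w :: rest) = List.countP pvHardB rest := by
        simp [hw]
      rw [List.foldl_cons, pvStepA_eq, if_neg (by simp [hw]), ih, e1]
      refine Prod.ext_iff.mpr ⟨?_, ?_⟩ <;> simp only [List.length_cons] <;>
        push_cast <;> ring_nf

-- ===== VERDICT (by name: the statement is the Claim_ definition above) =====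
theorem calculate_sentence_difficulty_spec : Claim_equal_calculate_sentence_difficulty := by
  intro S _
  unfold Spec_calculate_sentence_difficulty calculate_sentence_difficulty
    calculate_sentence_difficulty_alt
  rw [pvFoldA]
  push_cast
  ring
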